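-- pv_equiv track=rewrite | github.com/GitVladlen/docx-te-parser | te-parser.py | split_nodes_by_encounters
-- ===== SOURCE A (Python) =====
-- def split_nodes_by_encounters(nodes):
--     result = []
--     cur_nodes = []
--     for node in nodes:
--         print ("++++++++", node)
--         tag, _ = node
--
--         if tag == "ID":
--             if cur_nodes:
--                 result.append(cur_nodes)
--             cur_nodes = []
--
--         cur_nodes.append(node)
--
--     if cur_nodes:
--         result.append(cur_nodes)
--
--     # print "".join(map(lambda (index, nodes): "{}. {}\n\n".format(index, nodes), enumerate(result)))
--     return result
--     pass
-- ===== SOURCE B (Python) =====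
-- def split_nodes_by_encounters(nodes):
--     bounds = [0]
--     for i, node in enumerate(nodes):
--         print ("++++++++", node)
--         tag, _ = node
--         if tag == "ID" and i > 0:
--             bounds.append(i)
--     if not nodes:
--         return []
--     bounds.append(len(nodes))
--     return [nodes[a:b] for a, b in zip(bounds, bounds[1:])]
-- ===== Notes on version B (the rewrite author's own statement) =====
-- stated objective: alternative
-- what changed: Replaces A's incremental accumulator pair (result, cur_nodes) with a compute-boundary-indices-then-slice decomposition: one pass collects group start indices (0 plus every i>0 with tag 'ID'), then the result is built by slicing nodes between consecutive boundaries.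
import Mathlib
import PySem

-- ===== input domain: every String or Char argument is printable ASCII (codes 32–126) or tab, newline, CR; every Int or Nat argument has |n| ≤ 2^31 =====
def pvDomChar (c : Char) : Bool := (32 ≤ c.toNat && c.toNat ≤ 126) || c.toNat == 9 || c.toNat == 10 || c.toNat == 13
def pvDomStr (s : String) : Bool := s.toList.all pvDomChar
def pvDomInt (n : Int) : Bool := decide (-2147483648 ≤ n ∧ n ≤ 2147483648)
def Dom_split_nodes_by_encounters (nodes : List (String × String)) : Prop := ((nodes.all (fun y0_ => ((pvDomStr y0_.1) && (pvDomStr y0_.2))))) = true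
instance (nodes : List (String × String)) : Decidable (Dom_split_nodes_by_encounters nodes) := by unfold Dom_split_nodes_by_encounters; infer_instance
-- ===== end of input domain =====

-- B replaces A's incremental accumulator pair (result, cur_nodes) by a compute-boundaries-then-
-- slice decomposition (same cost; objective: alternative). Printing in the Pythons is a side
-- effect outside the claim: the equivalence proved is about the return value.


-- ===== PORT A =====
-- the loop body: on an "ID" tag flush cur_nodes (if nonempty) into result and reset; then append node
def pvStepA (s : List (List (String × String)) × List (String × String)) (node : String × String) :
    List (List (String × String)) × List (String × String) :=
  if node.1 == "ID" then
    (if s.2.isEmpty then s.1 else s.1 ++ [s.2], [node])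
  else
    (s.1, s.2 ++ [node])

def split_nodes_by_encounters (nodes : List (String × String)) : List (List (String × String)) :=
  let s := nodes.foldl pvStepA ([], [])
  if s.2.isEmpty then s.1 else s.1 ++ [s.2]

-- ===== PORT B =====
-- Source B: collect boundary indices (0, plus each i>0 whose tag is "ID"), then slice between
-- consecutive boundaries
def pvStepB (bs : List Int) (p : Int × (String × String)) : List Int :=
  if p.2.1 == "ID" && decide (0 < p.1) then bs ++ [p.1] else bs

def split_nodes_by_encounters_alt (nodes : List (String × String)) : List (List (String × String)) :=
  let bounds : List Int := (PySem.List.enumerate nodes).foldl pvStepB [0]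
  if nodes.isEmpty then [] else
    let bounds := bounds ++ [(nodes.length : Int)]
    (bounds.zip bounds.tail).map (fun ab => PySem.List.slice nodes (some ab.1) (some ab.2))

-- ===== PRECONDITION & SPEC =====
def Spec_split_nodes_by_encounters (nodes : List (String × String)) (out : List (List (String × String))) : Prop := out = split_nodes_by_encounters_alt nodes
instance (nodes : List (String × String)) (out : List (List (String × String))) : Decidable (Spec_split_nodes_by_encounters nodes out) := by unfold Spec_split_nodes_by_encounters; infer_instance

-- ===== CLAIM (what is proved, stated in full; the proofs are below) =====
def Claim_equal_split_nodes_by_encounters : Prop := ∀ (nodes : List (String × String)), Dom_split_nodes_by_encounters nodes → Spec_split_nodes_by_encounters nodes (split_nodes_by_encounters nodes)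

-- ===== LEMMAS AND PROOFS =====

-- the common specification: groups start at each "ID" tag, leading non-ID nodes form the first group
def pvNonID (n : String × String) : Bool := !(n.1 == "ID")

def pvChunks : List (String × String) → List (List (String × String))
  | [] => []
  | x :: xs =>
      (x :: xs.takeWhile pvNonID) :: pvChunks (xs.dropWhile pvNonID)
termination_by l => l.length
decreasing_by
  have := List.length_dropWhile_le pvNonID xs
  simp; omega

def pvFinishA (s : List (List (String × String)) × List (String × String)) : List (List (String × String)) :=
  if s.2.isEmpty then s.1 else s.1 ++ [s.2]

theorem pvFinishA_append (a : List (List (String × String)))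
    (s : List (List (String × String)) × List (String × String)) :
    pvFinishA (a ++ s.1, s.2) = a ++ pvFinishA s := by
  simp only [pvFinishA]
  split_ifs <;> simp

theorem pvFoldA_res (l : List (String × String)) (res : List (List (String × String)))
    (cur : List (String × String)) :
    l.foldl pvStepA (res, cur) = (res ++ (l.foldl pvStepA ([], cur)).1, (l.foldl pvStepA ([], cur)).2) := by
  induction l generalizing res cur with
  | nil => simp
  | cons x l ih =>
    simp only [List.foldl_cons]
    by_cases hx : x.1 == "ID"
    · by_cases hc : cur.isEmpty
      · have h1 : pvStepA (res, cur) x = (res, [x]) := by simp [pvStepA, hx, hc]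
        have h2 : pvStepA ([], cur) x = ([], [x]) := by simp [pvStepA, hx, hc]
        rw [h1, h2, ih res [x]]
      · have h1 : pvStepA (res, cur) x = (res ++ [cur], [x]) := by simp [pvStepA, hx, hc]
        have h2 : pvStepA ([], cur) x = ([cur], [x]) := by simp [pvStepA, hx, hc]
        rw [h1, h2, ih (res ++ [cur]) [x], ih [cur] [x]]
        simp
    · have h1 : pvStepA (res, cur) x = (res, cur ++ [x]) := by simp [pvStepA, hx]
      have h2 : pvStepA ([], cur) x = ([], cur ++ [x]) := by simp [pvStepA, hx]
      rw [h1, h2, ih res (cur ++ [x])]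

theorem pvA_loop (l : List (String × String)) (cur : List (String × String)) (h : ¬ cur.isEmpty) :
    pvFinishA (l.foldl pvStepA ([], cur)) =
      (cur ++ l.takeWhile pvNonID) :: pvChunks (l.dropWhile pvNonID) := by
  induction l generalizing cur with
  | nil => simp [pvFinishA, h, pvChunks]
  | cons x l ih =>
    by_cases hx : x.1 == "ID"
    · have hstep : pvStepA ([], cur) x = ([cur], [x]) := by
        simp [pvStepA, hx, h]
      simp only [List.foldl_cons, hstep]
      rw [pvFoldA_res l [cur] [x]]
      rw [pvFinishA_append [cur] (l.foldl pvStepA ([], [x]))]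
      rw [ih [x] (by simp)]
      have hnx : pvNonID x = false := by simp [pvNonID, hx]
      simp only [List.takeWhile_cons, List.dropWhile_cons, hnx, Bool.false_eq_true, if_neg,
        not_false_iff, List.append_nil]
      rw [pvChunks]
      simp
    · have hstep : pvStepA ([], cur) x = ([], cur ++ [x]) := by
        simp [pvStepA, hx]
      simp only [List.foldl_cons, hstep]
      rw [ih (cur ++ [x]) (by simp)]
      have hnx : pvNonID x = true := by simp [pvNonID, hx]
      simp [hnx]

theorem pvA_eq_chunks (nodes : List (String × String)) :
    split_nodes_by_encounters nodes = pvChunks nodes := by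
  cases nodes with
  | nil => simp [split_nodes_by_encounters, pvChunks]
  | cons x xs =>
    have hstep : pvStepA ([], []) x = ([], [x]) := by
      by_cases hx : x.1 == "ID" <;> simp [pvStepA, hx]
    have : split_nodes_by_encounters (x :: xs) = pvFinishA ((x :: xs).foldl pvStepA ([], [])) := rfl
    rw [this]
    simp only [List.foldl_cons, hstep]
    rw [pvA_loop xs [x] (by simp)]
    rw [pvChunks]
    simp

-- B side
def pvIdxs (l : List (String × String)) (s : Int) : List Int :=
  ((PySem.List.enumerate l s).filter (fun p => p.2.1 == "ID" && decide (0 < p.1))).map (·.1)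

def pvMkS (l : List (String × String)) : List Int → List (List (String × String))
  | a :: b :: bs => PySem.List.slice l (some a) (some b) :: pvMkS l (b :: bs)
  | _ => []

theorem pvZip_eq_mkS (l : List (String × String)) (bs : List Int) :
    (bs.zip bs.tail).map (fun ab => PySem.List.slice l (some ab.1) (some ab.2)) = pvMkS l bs := by
  induction bs with
  | nil => simp [pvMkS]
  | cons a t ih =>
    cases t with
    | nil => simp [pvMkS]
    | cons b t' =>
      simp only [List.tail_cons, List.zip_cons_cons, List.map_cons, pvMkS]
      rw [← ih]
      simp

theorem pvIdxs_nil (s : Int) : pvIdxs [] s = [] := by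
  simp [pvIdxs, PySem.List.enumerate]

theorem pvIdxs_cons (x : String × String) (xs : List (String × String)) (s : Int) :
    pvIdxs (x :: xs) s =
      (if x.1 == "ID" && decide (0 < s) then [s] else []) ++ pvIdxs xs (s + 1) := by
  simp only [pvIdxs, PySem.List.enumerate_cons, List.filter_cons]
  by_cases h : x.1 == "ID" && decide (0 < s) <;> simp [h]

theorem pvIdxs_nonneg (l : List (String × String)) (s : Int) (hs : 0 ≤ s) :
    ∀ b ∈ pvIdxs l s, 0 ≤ b := by
  induction l generalizing s with
  | nil => simp [pvIdxs_nil]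
  | cons x xs ih =>
    intro b hb
    rw [pvIdxs_cons] at hb
    rcases List.mem_append.mp hb with h | h
    · split_ifs at h with hc
      · simp at h; omega
      · simp at h
    · exact ih (s + 1) (by omega) b h

theorem pvIdxs_shift (l : List (String × String)) (s d : Int) (hs : 0 < s) (hd : 0 ≤ d) :
    pvIdxs l (s + d) = (pvIdxs l s).map (· + d) := by
  induction l generalizing s with
  | nil => simp [pvIdxs_nil]
  | cons x xs ih =>
    rw [pvIdxs_cons, pvIdxs_cons]
    have h1 : decide (0 < s) = true := by simp; omega
    have h2 : decide (0 < s + d) = true := by simp; omega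
    rw [List.map_append]
    congr 1
    · by_cases hx : x.1 == "ID" <;> simp [hx, h1, h2]
    · have : s + d + 1 = (s + 1) + d := by ring
      rw [this, ih (s + 1) (by omega)]

theorem pvIdxs_append_nonID (t l : List (String × String)) (s : Int)
    (ht : ∀ n ∈ t, pvNonID n = true) :
    pvIdxs (t ++ l) s = pvIdxs l (s + t.length) := by
  induction t generalizing s with
  | nil => simp
  | cons x t' ih =>
    have hx : (x.1 == "ID") = false := by
      have := ht x (by simp)
      simpa [pvNonID] using this
    rw [List.cons_append, pvIdxs_cons, hx]
    simp only [Bool.false_and, if_neg, Bool.false_eq_true, not_false_iff, List.nil_append]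
    rw [ih (s + 1) (fun n hn => ht n (List.mem_cons_of_mem _ hn))]
    congr 1
    simp only [List.length_cons]
    push_cast
    ring

theorem pvSlice_shift (g rest : List (String × String)) (a b : Int) (ha : 0 ≤ a) (hb : 0 ≤ b) :
    PySem.List.slice (g ++ rest) (some (a + (g.length : Int))) (some (b + (g.length : Int))) =
      PySem.List.slice rest (some a) (some b) := by
  rw [PySem.List.slice_toNat _ (by omega) (by omega), PySem.List.slice_toNat _ ha hb]
  have hA : (a + (g.length : Int)).toNat = a.toNat + g.length := by omega
  have hB : (b + (g.length : Int)).toNat = b.toNat + g.length := by omega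
  rw [hA, hB]
  rw [List.drop_append]
  have : g.length ≤ a.toNat + g.length := by omega
  rw [List.drop_eq_nil_of_le (by omega : g.length ≤ a.toNat + g.length)]
  simp only [List.nil_append]
  congr 1
  · omega
  · congr 1
    omega

theorem pvMkS_shift (g rest : List (String × String)) (bs : List Int)
    (hb : ∀ b ∈ bs, 0 ≤ b) :
    pvMkS (g ++ rest) (bs.map (· + (g.length : Int))) = pvMkS rest bs := by
  induction bs with
  | nil => simp [pvMkS]
  | cons a t ih =>
    cases t with
    | nil => simp [pvMkS]
    | cons b t' =>
      simp only [List.map_cons, pvMkS]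
      rw [pvSlice_shift g rest a b (hb a (by simp)) (hb b (by simp))]
      have := ih (fun x hx => hb x (by simp at hx ⊢; tauto))
      simp only [List.map_cons] at this
      rw [this]

theorem pvB_core : ∀ (n : Nat) (nodes : List (String × String)), nodes.length ≤ n → nodes ≠ [] →
    pvMkS nodes (0 :: pvIdxs nodes 0 ++ [(nodes.length : Int)]) = pvChunks nodes := by
  intro n
  induction n with
  | zero => intro nodes hlen hne; cases nodes <;> simp_all
  | succ n ih =>
    intro nodes hlen hne
    cases nodes with
    | nil => simp at hne
    | cons x xs =>
      set t := xs.takeWhile pvNonID with ht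
      set ys := xs.dropWhile pvNonID with hys
      have hxs : xs = t ++ ys := (List.takeWhile_append_dropWhile).symm
      have htall : ∀ m ∈ t, pvNonID m = true := fun m hm => List.mem_takeWhile_imp hm
      have h0 : pvIdxs (x :: xs) 0 = pvIdxs ys (1 + (t.length : Int)) := by
        rw [pvIdxs_cons]
        rw [if_neg (by simp)]
        rw [List.nil_append, hxs]
        simp only [zero_add]
        rw [pvIdxs_append_nonID t ys 1 htall]
      have hchunks : pvChunks (x :: xs) = (x :: t) :: pvChunks ys := by
        rw [pvChunks]
      cases hysc : ys with
      | nil =>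
        have hxt : xs = t := by rw [hxs, hysc, List.append_nil]
        rw [h0, hysc, pvIdxs_nil]
        have : pvMkS (x :: xs) (0 :: [] ++ [((x :: xs).length : Int)]) = [x :: xs] := by
          have he : (0 : Int) :: [] ++ [((x :: xs).length : Int)] =
              [((0 : Nat) : Int), (((x :: xs).length : Nat) : Int)] := by simp
          rw [he]
          simp only [pvMkS]
          rw [PySem.List.slice_natCast]
          simp
        rw [this, hchunks, hysc, pvChunks, hxt]
      | cons y ys' =>
        have hy : pvNonID y = false := by
          have hh : (xs.dropWhile pvNonID).head? = some y := by rw [← hys, hysc]; rfl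
          have hnot := List.head?_dropWhile_not pvNonID xs
          rw [hh] at hnot
          simpa using hnot
        have hyID : (y.1 == "ID") = true := by
          simpa [pvNonID] using hy
        have hk : (0:Int) < 1 + (t.length : Int) := by positivity
        have hidx : pvIdxs ys 0 = pvIdxs ys' 1 := by
          rw [hysc, pvIdxs_cons]
          rw [if_neg (by simp)]
          simp
        have h1 : pvIdxs ys (1 + (t.length : Int)) =
            (1 + (t.length : Int)) :: (pvIdxs ys' 1).map (· + (1 + (t.length : Int))) := by
          rw [hysc, pvIdxs_cons]
          rw [if_pos (by simp [hyID]; omega)]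
          have : 1 + (t.length : Int) + 1 = (1 : Int) + (1 + (t.length : Int)) := by ring
          rw [this, pvIdxs_shift ys' 1 (1 + (t.length : Int)) (by omega) (by omega)]
          simp
        have hglen : ((x :: t).length : Int) = 1 + (t.length : Int) := by
          simp; ring
        have hlentot : ((x :: xs).length : Int) = (ys.length : Int) + (1 + (t.length : Int)) := by
          rw [hxs]
          simp
          ring
        have hmapeq : 0 :: pvIdxs (x :: xs) 0 ++ [((x :: xs).length : Int)] =
            0 :: (0 :: pvIdxs ys' 1 ++ [(ys.length : Int)]).map (· + ((x :: t).length : Int)) := by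
          rw [h0, h1, hglen, hlentot]
          simp only [List.map_cons, List.map_append, List.map_cons, List.map_nil]
          simp
        rw [hmapeq]
        have hnodes : x :: xs = (x :: t) ++ ys := by rw [hxs]; rfl
        have hbsnn : ∀ b ∈ (0 : Int) :: pvIdxs ys' 1 ++ [(ys.length : Int)], 0 ≤ b := by
          intro b hbm
          rcases List.mem_cons.mp hbm with h | h
          · omega
          rcases List.mem_append.mp h with h2 | h2
          · exact pvIdxs_nonneg ys' 1 (by omega) b h2
          · simp only [List.mem_singleton] at h2
            omega
        -- peel the first slice, shift the rest
        have hfirst : pvMkS (x :: xs)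
              (0 :: (0 :: pvIdxs ys' 1 ++ [(ys.length : Int)]).map (· + ((x :: t).length : Int))) =
            PySem.List.slice (x :: xs) (some 0) (some ((x :: t).length : Int)) ::
              pvMkS (x :: xs) ((0 :: pvIdxs ys' 1 ++ [(ys.length : Int)]).map (· + ((x :: t).length : Int))) := by
          simp [pvMkS]
        rw [hfirst]
        have hsl : PySem.List.slice (x :: xs) (some 0) (some ((x :: t).length : Int)) = x :: t := by
          have h00 : (0 : Int) = ((0 : Nat) : Int) := rfl
          rw [h00, PySem.List.slice_natCast]
          rw [hnodes]
          simp
        rw [hsl]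
        have hshift : pvMkS (x :: xs) ((0 :: pvIdxs ys' 1 ++ [(ys.length : Int)]).map (· + ((x :: t).length : Int))) =
            pvMkS ys (0 :: pvIdxs ys' 1 ++ [(ys.length : Int)]) := by
          rw [hnodes]
          exact pvMkS_shift (x :: t) ys _ hbsnn
        rw [hshift, ← hidx]
        have hyslen : ys.length ≤ xs.length := by
          rw [hys]
          exact List.length_dropWhile_le _ _
        have hxslen : xs.length ≤ n := by simpa using hlen
        rw [ih ys (by omega) (by rw [hysc]; simp)]
        rw [hchunks]

theorem pvB_alt (nodes : List (String × String)) :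
    split_nodes_by_encounters_alt nodes = pvChunks nodes := by
  cases hn : nodes with
  | nil => simp [split_nodes_by_encounters_alt, pvChunks]
  | cons x xs =>
    have hfold : (PySem.List.enumerate (x :: xs)).foldl pvStepB [0] =
        [0] ++ pvIdxs (x :: xs) 0 := by
      have : pvStepB = (fun acc (p : Int × (String × String)) =>
          if (p.2.1 == "ID" && decide (0 < p.1)) = true then acc ++ [p.1] else acc) := by
        funext acc p
        simp [pvStepB]
      rw [this, PySem.List.foldl_append_if]
      rfl
    have hne : (x :: xs).isEmpty = false := rfl
    simp only [split_nodes_by_encounters_alt, hne, Bool.false_eq_true, if_neg, not_false_iff]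
    rw [hfold, pvZip_eq_mkS]
    have : ([0] ++ pvIdxs (x :: xs) 0) ++ [((x :: xs).length : Int)] =
        0 :: pvIdxs (x :: xs) 0 ++ [((x :: xs).length : Int)] := by simp
    rw [this]
    exact pvB_core (x :: xs).length (x :: xs) (le_refl _) (by simp)

-- ===== VERDICT (by name: the statement is the Claim_ definition above) =====
theorem split_nodes_by_encounters_spec : Claim_equal_split_nodes_by_encounters := by
  intro nodes _
  unfold Spec_split_nodes_by_encounters
  rw [pvA_eq_chunks, pvB_alt]
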